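-- pv_equiv track=rewrite | github.com/Dave0519/newsletter | openclaw/agents/orchestrator.py | _apply_country_floor
-- ===== SOURCE A (Python) =====
-- def _apply_country_floor(selected: list[dict], fallback_pool: list[dict], country_floor: dict) -> list[dict]:
--     if not country_floor:
--         return selected
--     out = list(selected or [])
--     used = set([(it.get("url") or it.get("source_url") or "").strip().lower() for it in out])
--
--     def count_country(c):
--         return sum(1 for x in out if x.get("country", "GLOBAL") == c)
--
--     # prefer already-ranked fallback order
--     for country, need_n in country_floor.items():
--         while count_country(country) < int(need_n):
--             cand = None
--             for it in fallback_pool or []: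
--                 u = (it.get("url") or it.get("source_url") or "").strip().lower()
--                 if not u or u in used:
--                     continue
--                 if it.get("country", "GLOBAL") != country:
--                     continue
--                 cand = it
--                 break
--             if cand is None:
--                 break
--             out.append(cand)
--             used.add((cand.get("url") or cand.get("source_url") or "").strip().lower())
--     return out
-- ===== SOURCE B (Python) =====
-- def _apply_country_floor(selected: list[dict], fallback_pool: list[dict], country_floor: dict) -> list[dict]:
--     if not country_floor:
--         return selected
--     out = list(selected or [])
--     used = set([(it.get("url") or it.get("source_url") or "").strip().lower() for it in out])
--     # per-country counts of the current selection, maintained incrementally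
--     counts = {}
--     for x in out:
--         c = x.get("country", "GLOBAL")
--         counts[c] = counts.get(c, 0) + 1
--     # group the fallback pool by country once, preserving ranked order
--     groups = {}
--     for it in fallback_pool or []:
--         groups.setdefault(it.get("country", "GLOBAL"), []).append(it)
--     for country, need_n in country_floor.items():
--         need = int(need_n) - counts.get(country, 0)
--         added = 0
--         for it in groups.get(country, []):
--             if added >= need:
--                 break
--             u = (it.get("url") or it.get("source_url") or "").strip().lower()
--             if not u or u in used:
--                 continue
--             used.add(u)
--             out.append(it)
--             added += 1
--         counts[country] = counts.get(country, 0) + added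
--     return out
-- ===== Notes on version B (the rewrite author's own statement) =====
-- stated objective: faster
-- what changed: B groups the fallback pool by country once and keeps an incrementally maintained per-country count dict, so each floor entry is served by a single forward pass over its own group instead of A's per-added-item recount of `out` plus full rescan of the whole pool.
import Mathlib
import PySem

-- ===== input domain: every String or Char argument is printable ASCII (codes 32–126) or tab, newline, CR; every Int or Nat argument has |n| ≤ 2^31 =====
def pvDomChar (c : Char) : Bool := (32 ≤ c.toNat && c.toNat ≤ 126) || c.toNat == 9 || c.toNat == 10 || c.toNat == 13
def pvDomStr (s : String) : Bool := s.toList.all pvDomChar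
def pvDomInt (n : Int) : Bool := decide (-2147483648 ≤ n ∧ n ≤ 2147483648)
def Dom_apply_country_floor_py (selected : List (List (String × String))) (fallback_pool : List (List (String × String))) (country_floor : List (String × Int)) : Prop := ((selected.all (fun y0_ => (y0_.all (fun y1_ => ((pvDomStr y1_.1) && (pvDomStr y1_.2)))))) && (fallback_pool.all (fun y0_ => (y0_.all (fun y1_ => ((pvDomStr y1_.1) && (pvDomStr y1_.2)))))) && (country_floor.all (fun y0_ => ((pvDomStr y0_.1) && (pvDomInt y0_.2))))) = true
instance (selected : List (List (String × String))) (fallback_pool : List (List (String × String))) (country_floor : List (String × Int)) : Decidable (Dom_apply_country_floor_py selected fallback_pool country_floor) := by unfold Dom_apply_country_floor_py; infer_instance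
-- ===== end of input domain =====

-- B replaces A's per-country rescans of `out` and of the whole fallback pool (a recount of `out`
-- and a full pool scan per added item) by a one-time per-country grouping of the pool and an
-- incrementally maintained per-country count dict; measured faster (asymptotic). Objective: faster.

-- ===== PORT A =====
-- shared item accessors: both Pythons evaluate these exact expressions on an item dict
-- `(it.get("url") or it.get("source_url") or "").strip().lower()` and `it.get("country", "GLOBAL")`
def pvUrlKey (it : List (String × String)) : String :=
  let a := ((PySem.Dict.mk it).get? "url").getD ""
  let b := if a = "" then ((PySem.Dict.mk it).get? "source_url").getD "" else a
  PySem.Str.lower (PySem.Str.strip b)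

def pvCountryOf (it : List (String × String)) : String :=
  ((PySem.Dict.mk it).get? "country").getD "GLOBAL"

-- A's count_country: sum(1 for x in out if x.get("country","GLOBAL") == c)
def pvCountA (out : List (List (String × String))) (c : String) : Int :=
  (out.countP (fun x => pvCountryOf x == c) : Int)

-- A's inner `for it in fallback_pool: … break` candidate search
def pvFindCand (pool : List (List (String × String))) (used : PySem.Set String)
    (country : String) : Option (List (String × String)) :=
  match pool with
  | [] => none
  | it :: rest =>
      let u := pvUrlKey it
      if u = "" || used.contains u then pvFindCand rest used country
      else if pvCountryOf it != country then pvFindCand rest used country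
      else some it

-- needed by pvWhileA's termination argument (cited in decreasing_by)
theorem pvFindCand_country {pool : List (List (String × String))} {used : PySem.Set String}
    {country : String} {it : List (String × String)}
    (h : pvFindCand pool used country = some it) : pvCountryOf it = country := by
  induction pool with
  | nil => simp [pvFindCand] at h
  | cons x rest ih =>
      simp only [pvFindCand] at h
      split at h
      · exact ih h
      · split at h
        · exact ih h
        · rename_i h2
          simp only [bne_iff_ne, not_not] at h2
          cases h; exact h2

theorem pvCountA_append (out : List (List (String × String))) (it : List (String × String))
    (c : String) :
    pvCountA (out ++ [it]) c = pvCountA out c + if pvCountryOf it == c then 1 else 0 := by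
  simp [pvCountA, List.countP_append, List.countP_cons]

-- A's `while count_country(country) < int(need_n): …` loop
def pvWhileA (pool : List (List (String × String))) (country : String) (need : Int)
    (out : List (List (String × String))) (used : PySem.Set String) :
    List (List (String × String)) × PySem.Set String :=
  if pvCountA out country < need then
    match h : pvFindCand pool used country with
    | none => (out, used)
    | some cand => pvWhileA pool country need (out ++ [cand]) (used.add (pvUrlKey cand))
  else (out, used)
termination_by (need - pvCountA out country).toNat
decreasing_by
  have hc := pvFindCand_country h
  have hca := pvCountA_append out cand country
  simp [hc] at hca
  omega

def apply_country_floor_py (selected : List (List (String × String)))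
    (fallback_pool : List (List (String × String)))
    (country_floor : List (String × Int)) : List (List (String × String)) :=
  if country_floor.isEmpty then selected
  else
    let out := selected
    let used : PySem.Set String := PySem.Set.ofList (out.map pvUrlKey)
    (country_floor.foldl
      (fun st kv => pvWhileA fallback_pool kv.1 kv.2 st.1 st.2) (out, used)).1

-- ===== PORT B =====
-- Source B's `counts` building loop: counts[c] = counts.get(c, 0) + 1
def pvCountsB (out : List (List (String × String))) : PySem.Dict String Int :=
  out.foldl (fun d x => d.insert (pvCountryOf x) (d.getD (pvCountryOf x) 0 + 1)) PySem.Dict.empty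

-- Source B's `groups` building loop: groups.setdefault(c, []).append(it)
def pvGroupsB (pool : List (List (String × String))) :
    PySem.Dict String (List (List (String × String))) :=
  pool.foldl (fun g it => g.insert (pvCountryOf it) (g.getD (pvCountryOf it) [] ++ [it]))
    PySem.Dict.empty

-- Source B's inner `for it in groups.get(country, []): …` loop (returns new added/out/used)
def pvTakeB (group : List (List (String × String))) (need : Int) (added : Int)
    (out : List (List (String × String))) (used : PySem.Set String) :
    Int × List (List (String × String)) × PySem.Set String :=
  match group with
  | [] => (added, out, used)
  | it :: rest =>
      if need ≤ added then (added, out, used)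
      else
        let u := pvUrlKey it
        if u = "" || used.contains u then pvTakeB rest need added out used
        else pvTakeB rest need (added + 1) (out ++ [it]) (used.add u)

def apply_country_floor_py_alt (selected : List (List (String × String)))
    (fallback_pool : List (List (String × String)))
    (country_floor : List (String × Int)) : List (List (String × String)) :=
  if country_floor.isEmpty then selected
  else
    let out := selected
    let used : PySem.Set String := PySem.Set.ofList (out.map pvUrlKey)
    let counts := pvCountsB out
    let groups := pvGroupsB fallback_pool
    (country_floor.foldl
      (fun st kv =>
        let need := kv.2 - st.2.2.getD kv.1 0
        let r := pvTakeB (groups.getD kv.1 []) need 0 st.1 st.2.1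
        (r.2.1, r.2.2, st.2.2.insert kv.1 (st.2.2.getD kv.1 0 + r.1)))
      (out, used, counts)).1

-- ===== PRECONDITION & SPEC =====
def Spec_apply_country_floor_py (selected : List (List (String × String))) (fallback_pool : List (List (String × String))) (country_floor : List (String × Int)) (out : List (List (String × String))) : Prop := out = apply_country_floor_py_alt selected fallback_pool country_floor
instance (selected : List (List (String × String))) (fallback_pool : List (List (String × String))) (country_floor : List (String × Int)) (out : List (List (String × String))) : Decidable (Spec_apply_country_floor_py selected fallback_pool country_floor out) := by unfold Spec_apply_country_floor_py; infer_instance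

-- ===== CLAIM (what is proved, stated in full; the proofs are below) =====
def Claim_equal_apply_country_floor_py : Prop := ∀ (selected : List (List (String × String))) (fallback_pool : List (List (String × String))) (country_floor : List (String × Int)), Dom_apply_country_floor_py selected fallback_pool country_floor → Spec_apply_country_floor_py selected fallback_pool country_floor (apply_country_floor_py selected fallback_pool country_floor)

-- ===== LEMMAS AND PROOFS =====

-- grouping: the group stored under c is exactly the country-c subsequence of the pool
theorem pvGroupsB_getD (pool : List (List (String × String)))
    (g : PySem.Dict String (List (List (String × String)))) (c : String) :
    (pool.foldl (fun g it => g.insert (pvCountryOf it) (g.getD (pvCountryOf it) [] ++ [it])) g).getD c []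
      = g.getD c [] ++ pool.filter (fun it => pvCountryOf it == c) := by
  induction pool generalizing g with
  | nil => simp
  | cons it rest ih =>
      simp only [List.foldl_cons, ih, List.filter_cons]
      by_cases h : pvCountryOf it = c
      · simp [h, PySem.Dict.getD_insert_self]
      · rw [PySem.Dict.getD_insert_of_ne _ _ _ (Ne.symm h)]
        simp [h]

-- counts: the counts dict agrees with A's count_country
theorem pvCountsB_getD (out : List (List (String × String))) (c : String) :
    (pvCountsB out).getD c 0 = pvCountA out c := by
  have key : ∀ (l : List (List (String × String))) (d : PySem.Dict String Int),
      (l.foldl (fun d x => d.insert (pvCountryOf x) (d.getD (pvCountryOf x) 0 + 1)) d).getD c 0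
        = d.getD c 0 + pvCountA l c := by
    intro l
    induction l with
    | nil => intro d; simp [pvCountA]
    | cons x rest ih =>
        intro d
        simp only [List.foldl_cons, ih]
        by_cases h : pvCountryOf x = c
        · simp [pvCountA, h, PySem.Dict.getD_insert_self]; ring
        · rw [PySem.Dict.getD_insert_of_ne _ _ _ (Ne.symm h)]
          simp [pvCountA, h]
  simpa [pvCountA] using key out PySem.Dict.empty

-- A's candidate search ignores items of other countries
theorem pvFindCand_filter (pool : List (List (String × String))) (used : PySem.Set String)
    (c : String) :
    pvFindCand pool used c = pvFindCand (pool.filter (fun it => pvCountryOf it == c)) used c := by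
  induction pool with
  | nil => rfl
  | cons it rest ih =>
      by_cases hc : pvCountryOf it = c
      · simp only [List.filter_cons, hc, beq_self_eq_true, if_true, pvFindCand]
        rw [ih]
      · have hne : (pvCountryOf it == c) = false := by simp [hc]
        simp only [List.filter_cons, hne, pvFindCand, bne, Bool.not_false, if_true, ih]
        split <;> rfl

-- Set.contains is monotone under add (proof helper)
theorem pvContains_add (s : PySem.Set String) (x y : String) (h : s.contains y = true) :
    (s.add x).contains y = true := by
  simp only [PySem.Set.contains, List.contains_iff_mem] at *
  exact (PySem.Set.mem_add s x y).2 (Or.inl h)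

-- a bad-url head is skipped by the candidate search
theorem pvFindCand_cons_bad (it : List (String × String)) (F : List (List (String × String)))
    (used : PySem.Set String) (c : String)
    (hbad : pvUrlKey it = "" ∨ used.contains (pvUrlKey it) = true) :
    pvFindCand (it :: F) used c = pvFindCand F used c := by
  rcases hbad with h | h
  · simp [pvFindCand, h]
  · simp only [PySem.Set.contains, List.contains_iff_mem] at h
    simp [pvFindCand, h]

-- non-dependent unfolding equation for pvWhileA (proof helper)
theorem pvWhileA_eq (pool : List (List (String × String))) (c : String) (need : Int)
    (out : List (List (String × String))) (used : PySem.Set String) :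
    pvWhileA pool c need out used
      = if pvCountA out c < need then
          (match pvFindCand pool used c with
           | none => (out, used)
           | some cand => pvWhileA pool c need (out ++ [cand]) (used.add (pvUrlKey cand)))
        else (out, used) := by
  rw [pvWhileA]
  by_cases hlt : pvCountA out c < need
  · simp only [if_pos hlt]
    split <;> rename_i heq <;> simp [heq]
  · simp [hlt]

theorem pvWhileA_filter (pool : List (List (String × String))) (c : String) (need : Int)
    (out : List (List (String × String))) (used : PySem.Set String) :
    pvWhileA pool c need out used
      = pvWhileA (pool.filter (fun it => pvCountryOf it == c)) c need out used := by
  fun_induction pvWhileA pool c need out used with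
  | case1 out used hlt hfc =>
      have h2 : pvFindCand (pool.filter (fun it => pvCountryOf it == c)) used c = none := by
        rw [← pvFindCand_filter]; exact hfc
      rw [pvWhileA_eq]; simp [hlt, h2]
  | case2 out used hlt cand hfc ih =>
      have h2 : pvFindCand (pool.filter (fun it => pvCountryOf it == c)) used c = some cand := by
        rw [← pvFindCand_filter]; exact hfc
      rw [ih]
      conv_rhs => rw [pvWhileA_eq]
      simp [hlt, h2]
  | case3 out used hlt =>
      rw [pvWhileA_eq]; simp [hlt]

-- an item whose url key is empty or already used stays skipped for the whole while loop
theorem pvWhileA_skip (c : String) (it : List (String × String))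
    (F : List (List (String × String))) (need : Int)
    (out : List (List (String × String))) (used : PySem.Set String)
    (hbad : pvUrlKey it = "" ∨ used.contains (pvUrlKey it) = true) :
    pvWhileA (it :: F) c need out used = pvWhileA F c need out used := by
  revert hbad
  fun_induction pvWhileA (it :: F) c need out used with
  | case1 out used hlt hfc =>
      intro hbad
      have h2 : pvFindCand F used c = none := by
        rw [← pvFindCand_cons_bad it F used c hbad]; exact hfc
      rw [pvWhileA_eq]; simp [hlt, h2]
  | case2 out used hlt cand hfc ih =>
      intro hbad
      have hb2 : pvUrlKey it = "" ∨ ((used.add (pvUrlKey cand)).contains (pvUrlKey it)) = true := by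
        rcases hbad with h | h
        · exact Or.inl h
        · exact Or.inr (pvContains_add used _ _ h)
      rw [ih hb2]
      have h2 : pvFindCand F used c = some cand := by
        rw [← pvFindCand_cons_bad it F used c hbad]; exact hfc
      conv_rhs => rw [pvWhileA_eq]
      simp [hlt, h2]
  | case3 out used hlt =>
      intro _
      rw [pvWhileA_eq]; simp [hlt]

theorem pvTakeB_shift (F : List (List (String × String))) (need a : Int)
    (out : List (List (String × String))) (used : PySem.Set String) :
    pvTakeB F need a out used
      = ((pvTakeB F (need - a) 0 out used).1 + a, (pvTakeB F (need - a) 0 out used).2) := by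
  induction F generalizing need a out used with
  | nil => simp [pvTakeB]
  | cons it rest ih =>
      by_cases hle : need ≤ a
      · have : need - a ≤ 0 := by omega
        simp [pvTakeB, hle, this]
      · have h0 : ¬ need - a ≤ (0 : Int) := by omega
        simp only [pvTakeB, if_neg hle, if_neg h0]
        split
        · exact ih need a out used
        · rw [ih need (a + 1), ih (need - a) (0 + 1),
            show need - a - (0 + 1) = need - (a + 1) by ring]
          exact Prod.ext (by ring) rfl

-- core: A's while loop over a single-country list = B's one-pass take
theorem pvInner (c : String) (F : List (List (String × String)))
    (hF : ∀ it ∈ F, pvCountryOf it = c) (need : Int)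
    (out : List (List (String × String))) (used : PySem.Set String) :
    pvWhileA F c need out used = (pvTakeB F (need - pvCountA out c) 0 out used).2 := by
  induction F generalizing need out used with
  | nil =>
      rw [pvWhileA_eq]
      simp [pvFindCand, pvTakeB]
  | cons it rest ih =>
      have hc : pvCountryOf it = c := hF it (by simp)
      have hrest : ∀ x ∈ rest, pvCountryOf x = c := fun x hx => hF x (by simp [hx])
      by_cases hlt : pvCountA out c < need
      · by_cases hbad : pvUrlKey it = "" ∨ used.contains (pvUrlKey it) = true
        · rw [pvWhileA_skip c it rest need out used hbad, ih hrest]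
          have h0 : ¬ need - pvCountA out c ≤ (0 : Int) := by omega
          conv_rhs => rw [pvTakeB]
          rcases hbad with h | h
          · simp [h0, h]
          · have hm : pvUrlKey it ∈ used := by
              simpa [PySem.Set.contains, List.contains_iff_mem] using h
            simp [h0, hm]
        · rw [not_or] at hbad
          obtain ⟨hne, hnc⟩ := hbad
          have hcontf : used.contains (pvUrlKey it) = false := by
            simpa using hnc
          have hnm : pvUrlKey it ∉ used := by
            simpa [PySem.Set.contains, List.contains_iff_mem] using hcontf
          have hfc : pvFindCand (it :: rest) used c = some it := by
            simp [pvFindCand, hne, hnm, hc]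
          have hself : (used.add (pvUrlKey it)).contains (pvUrlKey it) = true := by
            simp only [PySem.Set.contains, List.contains_iff_mem]
            exact (PySem.Set.mem_add used _ _).2 (Or.inr rfl)
          rw [pvWhileA_eq]
          simp only [if_pos hlt, hfc]
          rw [pvWhileA_skip c it rest need _ _ (Or.inr hself), ih hrest]
          rw [pvCountA_append]
          simp only [hc, beq_self_eq_true, if_true]
          have h0 : ¬ need - pvCountA out c ≤ (0 : Int) := by omega
          conv_rhs => rw [pvTakeB]
          simp only [if_neg h0, hne, hcontf]
          rw [if_neg (by simp)]
          rw [pvTakeB_shift rest (need - pvCountA out c) (0 + 1),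
            show need - pvCountA out c - (0 + 1) = need - (pvCountA out c + 1) by ring]
      · rw [pvWhileA_eq]
        have h0 : need - pvCountA out c ≤ (0 : Int) := by omega
        simp [hlt, pvTakeB, h0]

-- what B appends: an all-country-c extension, counted by `added`
theorem pvTakeB_out (c : String) (F : List (List (String × String)))
    (hF : ∀ it ∈ F, pvCountryOf it = c) (need a : Int)
    (out : List (List (String × String))) (used : PySem.Set String) :
    ∃ ext, (pvTakeB F need a out used).2.1 = out ++ ext ∧ (∀ x ∈ ext, pvCountryOf x = c) ∧
      (pvTakeB F need a out used).1 = a + ext.length := by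
  induction F generalizing a out used with
  | nil => exact ⟨[], by simp [pvTakeB]⟩
  | cons it rest ih =>
      have hc : pvCountryOf it = c := hF it (by simp)
      have hrest : ∀ x ∈ rest, pvCountryOf x = c := fun x hx => hF x (by simp [hx])
      by_cases hle : need ≤ a
      · exact ⟨[], by simp [pvTakeB, hle]⟩
      · simp only [pvTakeB, if_neg hle]
        split
        · exact ih hrest a out used
        · obtain ⟨ext, h1, h2, h3⟩ := ih hrest (a + 1) (out ++ [it]) (used.add (pvUrlKey it))
          refine ⟨it :: ext, ?_, ?_, ?_⟩
          · simpa using h1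
          · intro x hx
            rcases List.mem_cons.1 hx with h | h
            · exact h ▸ hc
            · exact h2 x h
          · rw [h3, List.length_cons]; push_cast; ring

theorem pvOuter (pool : List (List (String × String))) (cf : List (String × Int))
    (out : List (List (String × String))) (used : PySem.Set String)
    (counts : PySem.Dict String Int) (hc : ∀ c, counts.getD c 0 = pvCountA out c) :
    (cf.foldl (fun st kv => pvWhileA pool kv.1 kv.2 st.1 st.2) (out, used)).1
      = (cf.foldl
          (fun st kv =>
            let need := kv.2 - st.2.2.getD kv.1 0
            let r := pvTakeB ((pvGroupsB pool).getD kv.1 []) need 0 st.1 st.2.1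
            (r.2.1, r.2.2, st.2.2.insert kv.1 (st.2.2.getD kv.1 0 + r.1)))
          (out, used, counts)).1 := by
  induction cf generalizing out used counts with
  | nil => rfl
  | cons kv rest ih =>
      obtain ⟨c, n⟩ := kv
      simp only [List.foldl_cons]
      have hgrp : (pvGroupsB pool).getD c [] = pool.filter (fun it => pvCountryOf it == c) := by
        have h := pvGroupsB_getD pool PySem.Dict.empty c
        simpa [pvGroupsB] using h
      have hFf : ∀ it ∈ pool.filter (fun it => pvCountryOf it == c), pvCountryOf it = c := by
        intro x hx
        have := (List.mem_filter.1 hx).2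
        simpa using this
      have hwhile : pvWhileA pool c n out used
          = (pvTakeB ((pvGroupsB pool).getD c []) (n - pvCountA out c) 0 out used).2 := by
        rw [pvWhileA_filter, pvInner c _ hFf, hgrp]
      obtain ⟨ext, he1, he2, he3⟩ :=
        pvTakeB_out c _ hFf (n - pvCountA out c) 0 out used
      rw [← hgrp] at he1 he3
      simp only [hc c]
      have hstA : pvWhileA pool c n out used
          = ((pvTakeB ((pvGroupsB pool).getD c []) (n - pvCountA out c) 0 out used).2.1,
             (pvTakeB ((pvGroupsB pool).getD c []) (n - pvCountA out c) 0 out used).2.2) := by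
        rw [hwhile]
      rw [hstA]
      apply ih
      intro c'
      by_cases hcc : c' = c
      · subst hcc
        rw [PySem.Dict.getD_insert_self, he1, he3]
        simp only [pvCountA, List.countP_append]
        have : ext.countP (fun x => pvCountryOf x == c') = ext.length :=
          List.countP_eq_length.2 (fun x hx => by simp [he2 x hx])
        rw [this]
        push_cast
        ring
      · rw [PySem.Dict.getD_insert_of_ne _ _ _ hcc, hc c', he1]
        simp only [pvCountA, List.countP_append]
        have : ext.countP (fun x => pvCountryOf x == c') = 0 :=
          List.countP_eq_zero.2 (fun x hx => by simp [he2 x hx]; exact fun h => hcc h.symm)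
        rw [this]
        push_cast
        ring

-- ===== VERDICT (by name: the statement is the Claim_ definition above) =====
theorem apply_country_floor_py_spec : Claim_equal_apply_country_floor_py := by
  intro selected fallback_pool country_floor _
  unfold Spec_apply_country_floor_py apply_country_floor_py apply_country_floor_py_alt
  by_cases h : country_floor.isEmpty
  · simp [h]
  · simp only [h, Bool.false_eq_true, if_false]
    exact pvOuter fallback_pool country_floor selected _ _ (fun c => pvCountsB_getD selected c)
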